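-- pv_equiv track=rewrite | github.com/matsonj/based-eval | chainlex/optimization/metrics.py | score_guesses
-- ===== SOURCE A (Python) =====
-- from typing import List, Set
--
-- BYSTANDER_PENALTY = -5
--
-- ASSASSIN_PENALTY = -28
--
-- def score_guesses(
--     guesses: List[str],
--     friendly_words: Set[str],
--     bystanders: Set[str],
--     assassin: str,
-- ) -> int:
--     """Score a list of guesses according to ChainLex-1 rules.
--
--     Args:
--         guesses: Ordered list of guesses (most confident first)
--         friendly_words: Set of target words
--         bystanders: Set of neutral words
--         assassin: The assassin word
--
--     Returns:
--         Final score (can be negative)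
--     """
--     score = 0
--     correct_count = 0
--
--     for guess in guesses:
--         guess_upper = guess.upper()
--
--         if guess_upper == assassin.upper():
--             # Assassin - catastrophic
--             score += ASSASSIN_PENALTY
--             break
--         elif guess_upper in {w.upper() for w in bystanders}:
--             # Bystander - penalty and stop
--             score += BYSTANDER_PENALTY
--             break
--         elif guess_upper in {w.upper() for w in friendly_words}:
--             # Correct - triangular scoring
--             correct_count += 1
--             score += correct_count
--         # else: word not on board, skip (shouldn't happen)
--
--     return score
-- ===== SOURCE B (Python) =====
-- BYSTANDER_PENALTY = -5
-- ASSASSIN_PENALTY = -28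
--
--
-- def score_guesses(guesses, friendly_words, bystanders, assassin):
--     """Staged scoring: locate the first stopping word (assassin or bystander)
--     by index, count friendly hits in the prefix before it, and combine with
--     the closed-form triangular sum plus the penalty for the stopping word."""
--     assassin_upper = assassin.upper()
--     stop_set = {w.upper() for w in bystanders} | {assassin_upper}
--     friendly_upper = {w.upper() for w in friendly_words}
--     uppers = [g.upper() for g in guesses]
--     stop = next((i for i, g in enumerate(uppers) if g in stop_set), None)
--     if stop is None:
--         prefix, penalty = uppers, 0
--     else:
--         prefix = uppers[:stop]
--         penalty = ASSASSIN_PENALTY if uppers[stop] == assassin_upper else BYSTANDER_PENALTY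
--     count = sum(1 for g in prefix if g in friendly_upper)
--     return count * (count + 1) // 2 + penalty
-- ===== Notes on version B (the rewrite author's own statement) =====
-- stated objective: simpler
-- what changed: B is staged instead of an early-break accumulating loop: it uppercases everything once, locates the first stopping word (assassin or bystander) by index, counts friendly hits in the sliced prefix, and returns the closed form count*(count+1)//2 plus the stopping penalty, replacing A's per-step triangular accumulation with per-iteration set rebuilds.
import Mathlib
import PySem

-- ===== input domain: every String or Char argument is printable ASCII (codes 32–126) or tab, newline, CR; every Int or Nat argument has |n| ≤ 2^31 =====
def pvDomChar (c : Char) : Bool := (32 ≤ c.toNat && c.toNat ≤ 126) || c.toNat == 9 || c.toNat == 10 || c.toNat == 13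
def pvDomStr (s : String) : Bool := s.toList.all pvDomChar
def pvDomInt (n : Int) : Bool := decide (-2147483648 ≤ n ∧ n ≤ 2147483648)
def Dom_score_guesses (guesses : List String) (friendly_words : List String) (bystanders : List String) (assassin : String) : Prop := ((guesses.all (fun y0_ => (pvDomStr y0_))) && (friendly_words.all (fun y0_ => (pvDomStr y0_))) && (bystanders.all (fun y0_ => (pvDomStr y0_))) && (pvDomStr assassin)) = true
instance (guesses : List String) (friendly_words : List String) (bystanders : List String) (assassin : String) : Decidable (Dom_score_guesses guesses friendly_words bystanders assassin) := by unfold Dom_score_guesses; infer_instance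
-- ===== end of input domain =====

-- B replaces A's single early-break loop (per-step triangular accumulation with per-iteration
-- set rebuilds) by staged passes: find the first stopping index, count friendly hits in the
-- prefix before it, and combine with the closed form count*(count+1)//2; objective: simpler.

def pvBYSTANDER_PENALTY : Int := -5
def pvASSASSIN_PENALTY : Int := -28

-- ===== PORT A =====
-- A's loop: state (score, correct_count); rebuilds the uppercased sets at each iteration.
def pvLoopA (friendly_words bystanders : List String) (assassin : String) :
    List String → Int → Int → Int
  | [], score, _ => score
  | guess :: rest, score, cc =>
    let gu := PySem.Str.upper guess
    if gu == PySem.Str.upper assassin then score + pvASSASSIN_PENALTY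
    else if PySem.Set.contains (PySem.Set.ofList (bystanders.map PySem.Str.upper)) gu then
      score + pvBYSTANDER_PENALTY
    else if PySem.Set.contains (PySem.Set.ofList (friendly_words.map PySem.Str.upper)) gu then
      pvLoopA friendly_words bystanders assassin rest (score + (cc + 1)) (cc + 1)
    else pvLoopA friendly_words bystanders assassin rest score cc

def score_guesses (guesses : List String) (friendly_words : List String) (bystanders : List String) (assassin : String) : Int :=
  pvLoopA friendly_words bystanders assassin guesses 0 0

-- ===== PORT B =====
-- Source B staged: uppercase everything once, find the first stopping index with next/enumerate
-- (= List.findIdx?), slice the prefix, count friendly hits (sum of 1s = countP), closed form.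
def score_guesses_alt (guesses : List String) (friendly_words : List String) (bystanders : List String) (assassin : String) : Int :=
  let assassinUpper := PySem.Str.upper assassin
  let stopSet := PySem.Set.union (PySem.Set.ofList (bystanders.map PySem.Str.upper)) [assassinUpper]
  let friendlyUpper := PySem.Set.ofList (friendly_words.map PySem.Str.upper)
  let uppers := guesses.map PySem.Str.upper
  let stop := uppers.findIdx? (fun g => PySem.Set.contains stopSet g)
  let pp : List String × Int :=
    match stop with
    | none => (uppers, 0)
    | some i =>
      (PySem.List.slice uppers none (some (i : Int)),
       -- uppers[stop]: findIdx? returns an in-range index, so the default is never used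
       if PySem.List.pyGetD uppers (i : Int) "" == assassinUpper then pvASSASSIN_PENALTY
       else pvBYSTANDER_PENALTY)
  let count : Int := (pp.1.countP (fun g => PySem.Set.contains friendlyUpper g) : Int)
  PySem.Int.floordiv (count * (count + 1)) 2 + pp.2

-- ===== PRECONDITION & SPEC =====
def Spec_score_guesses (guesses : List String) (friendly_words : List String) (bystanders : List String) (assassin : String) (out : Int) : Prop := out = score_guesses_alt guesses friendly_words bystanders assassin
instance (guesses : List String) (friendly_words : List String) (bystanders : List String) (assassin : String) (out : Int) : Decidable (Spec_score_guesses guesses friendly_words bystanders assassin out) := by unfold Spec_score_guesses; infer_instance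

-- ===== CLAIM =====
def Claim_equal_score_guesses : Prop := ∀ (guesses : List String) (friendly_words : List String) (bystanders : List String) (assassin : String), Dom_score_guesses guesses friendly_words bystanders assassin → Spec_score_guesses guesses friendly_words bystanders assassin (score_guesses guesses friendly_words bystanders assassin)

-- ===== LEMMAS AND PROOFS =====

-- Proof-side recursive characterization of B's staged result:
-- (friendly hits before the first stopping word, penalty at the stop or 0).
def pvScanB (frU bysU : PySem.Set String) (aUp : String) : List String → Int × Int
  | [] => (0, 0)
  | guess :: rest =>
    let g := PySem.Str.upper guess
    if g == aUp then (0, pvASSASSIN_PENALTY)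
    else if PySem.Set.contains bysU g then (0, pvBYSTANDER_PENALTY)
    else if PySem.Set.contains frU g then
      let r := pvScanB frU bysU aUp rest
      (r.1 + 1, r.2)
    else pvScanB frU bysU aUp rest

-- B's stopping test is the disjunction of A's assassin and bystander tests.
theorem pvContains_stop (bysU : PySem.Set String) (aUp g : String) :
    PySem.Set.contains (PySem.Set.union bysU [aUp]) g
      = (PySem.Set.contains bysU g || g == aUp) := by
  rw [Bool.eq_iff_iff]
  simp [PySem.Set.mem_union]

-- The staged pair (count of friendly hits in the prefix, penalty at the stop) of B's port
-- equals the recursive scan on the raw guesses.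
theorem pvStaged_eq_scan (frU bysU : PySem.Set String) (aUp : String) :
    ∀ gs : List String,
      ((((match (gs.map PySem.Str.upper).findIdx?
            (fun g => PySem.Set.contains (PySem.Set.union bysU [aUp]) g) with
          | none => (gs.map PySem.Str.upper, (0 : Int))
          | some i =>
            (PySem.List.slice (gs.map PySem.Str.upper) none (some (i : Int)),
             if PySem.List.pyGetD (gs.map PySem.Str.upper) (i : Int) "" == aUp then
               pvASSASSIN_PENALTY
             else pvBYSTANDER_PENALTY)) : List String × Int)
        |> (fun pp =>
          (((pp.1.countP (fun g => PySem.Set.contains frU g) : Nat) : Int), pp.2))))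
      = pvScanB frU bysU aUp gs := by
  intro gs
  induction gs with
  | nil => rfl
  | cons guess rest ih =>
    simp only [List.map_cons, List.findIdx?_cons]
    by_cases hstop :
        PySem.Set.contains (PySem.Set.union bysU [aUp]) (PySem.Str.upper guess) = true
    · rw [if_pos hstop]
      rw [pvContains_stop] at hstop
      simp only [pvScanB, Nat.cast_zero]
      by_cases ha : (PySem.Str.upper guess == aUp) = true
      · simp [ha, PySem.List.pyGetD_zero_cons]
      · have hb : PySem.Set.contains bysU (PySem.Str.upper guess) = true := by
          rcases Bool.or_eq_true_iff.mp hstop with h | h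
          · exact h
          · exact absurd h ha
        have hb' : PySem.Str.upper guess ∈ bysU := by simpa using hb
        simp [ha, hb', PySem.List.pyGetD_zero_cons]
    · rw [if_neg hstop]
      rw [pvContains_stop] at hstop
      have ha : ¬ (PySem.Str.upper guess == aUp) = true := by
        intro h; exact hstop (by rw [h, Bool.or_true])
      have hb : ¬ PySem.Set.contains bysU (PySem.Str.upper guess) = true := by
        intro h; exact hstop (by rw [h, Bool.true_or])
      simp only [pvScanB, ha, hb, if_false, Bool.false_eq_true]
      have ih1 := congrArg Prod.fst ih
      have ih2 := congrArg Prod.snd ih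
      dsimp only at ih1 ih2
      cases hfi : (rest.map PySem.Str.upper).findIdx?
          (fun g => PySem.Set.contains (PySem.Set.union bysU [aUp]) g) with
      | none =>
        rw [hfi] at ih1 ih2
        simp only [Option.map_none]
        rw [List.countP_cons]
        by_cases hf : PySem.Set.contains frU (PySem.Str.upper guess) = true
        · simp only [hf, if_true]
          refine Prod.ext ?_ ?_
          · dsimp only; rw [← ih1]; push_cast; simp; try ring
          · dsimp only; rw [← ih2]
        · simp only [hf, if_false, Bool.false_eq_true]
          refine Prod.ext ?_ ?_
          · dsimp only; rw [← ih1]; simp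
          · dsimp only; rw [← ih2]
      | some j =>
        rw [hfi] at ih1 ih2
        simp only [Option.map_some]
        have hcast : ((j + 1 : Nat) : Int) = (j : Int) + 1 := by push_cast; ring
        have hslice :
            PySem.List.slice (PySem.Str.upper guess :: rest.map PySem.Str.upper) none
              (some ((j + 1 : Nat) : Int))
            = PySem.Str.upper guess :: PySem.List.slice (rest.map PySem.Str.upper) none (some (j : Int)) := by
          rw [PySem.List.slice_to_natCast, PySem.List.slice_to_natCast]
          simp [List.take_succ_cons]
        have hget :
            PySem.List.pyGetD (PySem.Str.upper guess :: rest.map PySem.Str.upper)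
              ((j + 1 : Nat) : Int) ""
            = PySem.List.pyGetD (rest.map PySem.Str.upper) (j : Int) "" := by
          rw [PySem.List.pyGetD_natCast, PySem.List.pyGetD_natCast]
          simp
        rw [hslice]
        simp only [hget]
        rw [List.countP_cons]
        by_cases hf : PySem.Set.contains frU (PySem.Str.upper guess) = true
        · simp only [hf, if_true]
          refine Prod.ext ?_ ?_
          · dsimp only; rw [← ih1]; push_cast; simp; try ring
          · dsimp only; rw [← ih2]
        · simp only [hf, if_false, Bool.false_eq_true]
          refine Prod.ext ?_ ?_
          · dsimp only; rw [← ih1]; simp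
          · dsimp only; rw [← ih2]

-- Invariant: doubling avoids division; A's loop from state (score, cc) adds
-- n*(2*cc + n + 1)/2 + p where (n, p) = the scan result.
theorem pvLoopA_eq_scan (fw bys : List String) (assassin : String) :
    ∀ (gs : List String) (score cc : Int),
      2 * pvLoopA fw bys assassin gs score cc
        = 2 * score
          + (pvScanB (PySem.Set.ofList (fw.map PySem.Str.upper))
              (PySem.Set.ofList (bys.map PySem.Str.upper))
              (PySem.Str.upper assassin) gs).1
            * (2 * cc
               + (pvScanB (PySem.Set.ofList (fw.map PySem.Str.upper))
                   (PySem.Set.ofList (bys.map PySem.Str.upper))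
                   (PySem.Str.upper assassin) gs).1 + 1)
          + 2 * (pvScanB (PySem.Set.ofList (fw.map PySem.Str.upper))
                  (PySem.Set.ofList (bys.map PySem.Str.upper))
                  (PySem.Str.upper assassin) gs).2
      ∧ 0 ≤ (pvScanB (PySem.Set.ofList (fw.map PySem.Str.upper))
              (PySem.Set.ofList (bys.map PySem.Str.upper))
              (PySem.Str.upper assassin) gs).1 := by
  intro gs
  induction gs with
  | nil => intro score cc; simp [pvLoopA, pvScanB]
  | cons g rest ih =>
    intro score cc
    simp only [pvLoopA, pvScanB]
    split_ifs with h1 h2 h3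
    · simp; ring
    · simp; ring
    · obtain ⟨ihEq, ihNonneg⟩ := ih (score + (cc + 1)) (cc + 1)
      constructor
      · simp only []
        rw [ihEq]; ring
      · simp only []
        omega
    · exact ih score cc

-- ===== VERDICT =====
theorem score_guesses_spec : Claim_equal_score_guesses := by
  intro guesses fw bys assassin _
  unfold Spec_score_guesses score_guesses score_guesses_alt
  dsimp only
  obtain ⟨hEq, hNonneg⟩ := pvLoopA_eq_scan fw bys assassin guesses 0 0
  have hstage := pvStaged_eq_scan
    (PySem.Set.ofList (fw.map PySem.Str.upper))
    (PySem.Set.ofList (bys.map PySem.Str.upper))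
    (PySem.Str.upper assassin) guesses
  have h1 := congrArg Prod.fst hstage
  have h2 := congrArg Prod.snd hstage
  dsimp only at h1 h2
  rw [h1, h2]
  rw [PySem.Int.floordiv_eq_ediv_of_pos (by omega)]
  have hn : ∀ n : Int, n * (2 * 0 + n + 1) = n * (n + 1) := fun n => by ring
  rw [hn] at hEq
  omega
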